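-- pv_equiv track=rewrite | github.com/sungyeong98/programmers | 프로그래머스/2/340212. ［PCCP 기출문제］ 2번 ／ 퍼즐 게임 챌린지/［PCCP 기출문제］ 2번 ／ 퍼즐 게임 챌린지.py | solve
-- ===== SOURCE A (Python) =====
-- def solve(diffs, times, limit, level):
--     cnt, n = 0, len(diffs)
--
--     for i in range(n):
--         if diffs[i] <= level:
--             cnt += times[i]
--         else:
--             fail = diffs[i] - level
--             temp_cnt = times[i] * fail
--             temp_cnt += times[i-1] * fail
--             temp_cnt += times[i]
--
--             cnt += temp_cnt
--     if limit<cnt: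
--         return False
--     return True
-- ===== SOURCE B (Python) =====
-- def solve(diffs, times, limit, level):
--     # Build a multiplicity for each time slot, then take one dot product:
--     # puzzle i contributes 1 play of slot i, plus (diffs[i]-level) extra plays
--     # of slot i and of slot i-1 when it is harder than the player's level.
--     coef = [0] * len(times)
--     for i, d in enumerate(diffs):
--         coef[i] += 1
--         if d > level:
--             f = d - level
--             coef[i] += f
--             coef[i - 1] += f
--     return sum(c * t for c, t in zip(coef, times)) <= limit
-- ===== Notes on version B (the rewrite author's own statement) =====
-- stated objective: alternative
-- what changed: B replaces A's per-puzzle running total with a different data structure: it builds a multiplicity array over the time slots (each puzzle bumps its own slot by 1, and a hard puzzle adds its penalty diffs[i]-level to its own and the previous slot's multiplicity, using Python's -1 wrap), then computes the total as one dot product of multiplicities with times.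
-- outside the precondition, e.g. on solve([1, 2], [5], 100, 0): A raises IndexError, B raises IndexError
import Mathlib
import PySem

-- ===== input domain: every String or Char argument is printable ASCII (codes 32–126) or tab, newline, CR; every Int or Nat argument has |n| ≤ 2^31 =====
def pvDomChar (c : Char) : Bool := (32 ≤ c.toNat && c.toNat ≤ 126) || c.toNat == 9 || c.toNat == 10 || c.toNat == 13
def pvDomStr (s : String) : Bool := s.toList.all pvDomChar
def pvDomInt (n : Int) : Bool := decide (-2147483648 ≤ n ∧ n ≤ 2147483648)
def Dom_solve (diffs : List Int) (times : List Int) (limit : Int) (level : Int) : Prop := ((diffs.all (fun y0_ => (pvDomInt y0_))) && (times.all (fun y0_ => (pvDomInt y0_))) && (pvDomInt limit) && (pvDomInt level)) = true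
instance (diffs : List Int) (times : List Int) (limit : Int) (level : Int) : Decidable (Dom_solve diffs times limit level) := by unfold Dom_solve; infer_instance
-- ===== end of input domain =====

-- B builds a multiplicity array over the time slots (each hard puzzle pushes its penalty
-- into its own and the previous slot's coefficient) and takes one dot product with times
-- (objective: alternative); same return value, no side effects in either version.

-- ===== PORT A =====
def solve (diffs : List Int) (times : List Int) (limit : Int) (level : Int) : Bool :=
  let n : Int := diffs.length
  let cnt : Int := (PySem.List.pyRange 0 n 1).foldl (fun cnt i =>
    if PySem.List.pyGetD diffs i 0 ≤ level then
      cnt + PySem.List.pyGetD times i 0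
    else
      let fail := PySem.List.pyGetD diffs i 0 - level
      let temp_cnt := PySem.List.pyGetD times i 0 * fail
      let temp_cnt := temp_cnt + PySem.List.pyGetD times (i - 1) 0 * fail
      let temp_cnt := temp_cnt + PySem.List.pyGetD times i 0
      cnt + temp_cnt) 0
  if limit < cnt then false else true

-- ===== PORT B =====
def solve_alt (diffs : List Int) (times : List Int) (limit : Int) (level : Int) : Bool :=
  let coef : List Int := List.replicate times.length 0
  let coef : List Int := (PySem.List.enumerate diffs 0).foldl (fun coef p =>
    let coef := PySem.List.pySetD coef p.1 (PySem.List.pyGetD coef p.1 0 + 1)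
    if p.2 > level then
      let f := p.2 - level
      let coef := PySem.List.pySetD coef p.1 (PySem.List.pyGetD coef p.1 0 + f)
      PySem.List.pySetD coef (p.1 - 1) (PySem.List.pyGetD coef (p.1 - 1) 0 + f)
    else coef) coef
  decide (((coef.zip times).map (fun p => p.1 * p.2)).sum ≤ limit)

-- ===== PRECONDITION & SPEC =====
-- A raises IndexError (times[i] with i ≥ len(times)) exactly when len(diffs) > len(times); excluded.
def Pre_solve (diffs : List Int) (times : List Int) (limit : Int) (level : Int) : Prop :=
  diffs.length ≤ times.length
instance (diffs : List Int) (times : List Int) (limit : Int) (level : Int) : Decidable (Pre_solve diffs times limit level) := by unfold Pre_solve; infer_instance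
def pvWitness_solve : List Int × List Int × Int × Int := ([1, 3, 2], [10, 20, 30], 100, 2)

def Spec_solve (diffs : List Int) (times : List Int) (limit : Int) (level : Int) (out : Bool) : Prop := out = solve_alt diffs times limit level
instance (diffs : List Int) (times : List Int) (limit : Int) (level : Int) (out : Bool) : Decidable (Spec_solve diffs times limit level out) := by unfold Spec_solve; infer_instance

-- ===== CLAIM (what is proved, stated in full; the proofs are below) =====
def Claim_equal_solve : Prop := ∀ (diffs : List Int) (times : List Int) (limit : Int) (level : Int), Dom_solve diffs times limit level → Pre_solve diffs times limit level → Spec_solve diffs times limit level (solve diffs times limit level)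

-- ===== LEMMAS AND PROOFS =====

-- dot product of a coefficient list with times, as B computes it
def dotP (c t : List Int) : Int := ((c.zip t).map (fun p => p.1 * p.2)).sum

lemma dotP_replicate_zero (t : List Int) : dotP (List.replicate t.length 0) t = 0 := by
  induction t with
  | nil => simp [dotP]
  | cons x t ih => simpa [dotP, List.replicate_succ] using ih

-- bumping slot n by v changes the dot product by v * t[n]
lemma dotP_set (c t : List Int) (n : Nat) (v : Int)
    (hn : n < c.length) (hlen : c.length ≤ t.length) :
    dotP (c.set n (c.getD n 0 + v)) t = dotP c t + v * t.getD n 0 := by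
  induction c generalizing t n with
  | nil => simp at hn
  | cons a c ih =>
    cases t with
    | nil => simp at hlen
    | cons b t =>
      cases n with
      | zero => simp [dotP]; ring
      | succ m =>
        have hm : m < c.length := by simpa using hn
        have hl : c.length ≤ t.length := by simpa using hlen
        have := ih t m hm hl
        simp only [List.set_cons_succ, List.getD_cons_succ, dotP, List.zip_cons_cons,
          List.map_cons, List.sum_cons] at this ⊢
        omega

-- a Python index admitted by the wrap rule resolves to one natural position
lemma pyIdx_resolve (len : Nat) (i : Int) (h1 : -(len : Int) ≤ i) (h2 : i < len) :
    ∃ n : Nat, n < len ∧ PySem.List.pyIdx? len i = some n := by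
  unfold PySem.List.pyIdx?
  by_cases h0 : 0 ≤ i
  · exact ⟨i.toNat, by omega, by simp [h0, h2]⟩
  · refine ⟨len - (-i).toNat, by omega, ?_⟩
    simp only [h0, if_false, h1, if_true]

lemma pySetD_resolve {α : Type} (xs : List α) (i : Int) (n : Nat) (w : α)
    (h : PySem.List.pyIdx? xs.length i = some n) :
    PySem.List.pySetD xs i w = xs.set n w := by
  simp [PySem.List.pySetD, PySem.List.pySet?, h]

lemma pyGetD_resolve {α : Type} [Inhabited α] (xs : List α) (i : Int) (n : Nat) (d : α)
    (hn : n < xs.length)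
    (h : PySem.List.pyIdx? xs.length i = some n) :
    PySem.List.pyGetD xs i d = xs.getD n d := by
  simp [PySem.List.pyGetD, PySem.List.pyGet?, h, List.getD_eq_getElem?_getD]

-- B's loop body
def bStep (level : Int) (coef : List Int) (p : Int × Int) : List Int :=
  let coef := PySem.List.pySetD coef p.1 (PySem.List.pyGetD coef p.1 0 + 1)
  if p.2 > level then
    let f := p.2 - level
    let coef := PySem.List.pySetD coef p.1 (PySem.List.pyGetD coef p.1 0 + f)
    PySem.List.pySetD coef (p.1 - 1) (PySem.List.pyGetD coef (p.1 - 1) 0 + f)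
  else coef

-- A's loop body, on an (index, value) pair
def aStep (times : List Int) (level : Int) (cnt : Int) (p : Int × Int) : Int :=
  if p.2 ≤ level then
    cnt + PySem.List.pyGetD times p.1 0
  else
    let fail := p.2 - level
    let temp_cnt := PySem.List.pyGetD times p.1 0 * fail
    let temp_cnt := temp_cnt + PySem.List.pyGetD times (p.1 - 1) 0 * fail
    let temp_cnt := temp_cnt + PySem.List.pyGetD times p.1 0
    cnt + temp_cnt

lemma length_bStep (level : Int) (coef : List Int) (p : Int × Int) :
    (bStep level coef p).length = coef.length := by
  unfold bStep
  split <;> simp [PySem.List.length_pySetD]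

-- one step: B's update moves the dot product by exactly A's increment
lemma dotP_bStep (times : List Int) (level : Int) (coef : List Int) (p : Int × Int)
    (hlen : coef.length = times.length)
    (h0 : 0 ≤ p.1) (h1 : p.1 < coef.length) (hm : -(coef.length : Int) ≤ p.1 - 1) :
    dotP (bStep level coef p) times = dotP coef times + aStep times level 0 p := by
  obtain ⟨n, hn, hres⟩ := pyIdx_resolve coef.length p.1 (by omega) h1
  have hres_t : PySem.List.pyIdx? times.length p.1 = some n := by rwa [← hlen]
  have hnt : n < times.length := by omega
  have hget_t : PySem.List.pyGetD times p.1 0 = times.getD n 0 := pyGetD_resolve _ _ _ _ hnt hres_t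
  unfold bStep aStep
  by_cases hp : p.2 > level
  · obtain ⟨n', hn', hres'⟩ := pyIdx_resolve coef.length (p.1 - 1) hm (by omega)
    have hres_t' : PySem.List.pyIdx? times.length (p.1 - 1) = some n' := by rwa [← hlen]
    have hget_t' : PySem.List.pyGetD times (p.1 - 1) 0 = times.getD n' 0 :=
      pyGetD_resolve _ _ _ _ (by omega) hres_t'
    set f := p.2 - level with hf
    -- first update: coef[p.1] += 1
    have e1s : PySem.List.pySetD coef p.1 (PySem.List.pyGetD coef p.1 0 + 1)
        = coef.set n (coef.getD n 0 + 1) := by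
      rw [pySetD_resolve coef p.1 n _ hres, pyGetD_resolve coef p.1 n 0 hn hres]
    set c1 := coef.set n (coef.getD n 0 + 1) with hc1
    have hc1len : c1.length = coef.length := by simp [hc1]
    -- second update: coef[p.1] += f
    have hres1 : PySem.List.pyIdx? c1.length p.1 = some n := by rwa [hc1len]
    have e2s : PySem.List.pySetD c1 p.1 (PySem.List.pyGetD c1 p.1 0 + f)
        = c1.set n (c1.getD n 0 + f) := by
      rw [pySetD_resolve c1 p.1 n _ hres1, pyGetD_resolve c1 p.1 n 0 (by omega) hres1]
    set c2 := c1.set n (c1.getD n 0 + f) with hc2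
    have hc2len : c2.length = coef.length := by simp [hc2, hc1]
    have hres2 : PySem.List.pyIdx? c2.length (p.1 - 1) = some n' := by rwa [hc2len]
    -- third update: coef[p.1 - 1] += f
    have e3s : PySem.List.pySetD c2 (p.1 - 1) (PySem.List.pyGetD c2 (p.1 - 1) 0 + f)
        = c2.set n' (c2.getD n' 0 + f) := by
      rw [pySetD_resolve c2 (p.1 - 1) n' _ hres2, pyGetD_resolve c2 (p.1 - 1) n' 0 (by omega) hres2]
    have d1 : dotP c1 times = dotP coef times + 1 * times.getD n 0 :=
      dotP_set coef times n 1 hn (by omega)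
    have d2 : dotP c2 times = dotP c1 times + f * times.getD n 0 :=
      dotP_set c1 times n f (by omega) (by omega)
    have d3 : dotP (c2.set n' (c2.getD n' 0 + f)) times = dotP c2 times + f * times.getD n' 0 :=
      dotP_set c2 times n' f (by omega) (by omega)
    simp only [if_pos hp, if_neg (not_le.mpr hp)]
    rw [e1s, e2s, e3s, d3, d2, d1, hget_t, hget_t']
    ring
  · have hp' : p.2 ≤ level := le_of_not_gt hp
    simp only [if_neg hp, if_pos hp']
    rw [pySetD_resolve coef p.1 n _ hres, pyGetD_resolve coef p.1 n 0 hn hres,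
      dotP_set coef times n 1 hn (by omega), hget_t]
    ring

-- loop invariant: A's running count is the change in B's dot product
lemma fold_inv (times : List Int) (level : Int) :
    ∀ (L : List (Int × Int)) (cnt : Int) (coef : List Int),
    coef.length = times.length →
    (∀ p ∈ L, 0 ≤ p.1 ∧ p.1 < (coef.length : Int) ∧ -(coef.length : Int) ≤ p.1 - 1) →
    L.foldl (aStep times level) cnt
      = cnt - dotP coef times + dotP (L.foldl (bStep level) coef) times := by
  intro L
  induction L with
  | nil => intro cnt coef _ _; simp
  | cons p L ih =>
    intro cnt coef hlen hmem
    obtain ⟨h0, h1, hm⟩ := hmem p (by simp)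
    have hstep := dotP_bStep times level coef p hlen h0 (by exact_mod_cast h1) hm
    have hlen' : (bStep level coef p).length = times.length := by
      rw [length_bStep]; exact hlen
    have hmem' : ∀ q ∈ L, 0 ≤ q.1 ∧ q.1 < ((bStep level coef p).length : Int) ∧
        -((bStep level coef p).length : Int) ≤ q.1 - 1 := by
      intro q hq; rw [length_bStep]; exact hmem q (by simp [hq])
    have := ih (aStep times level cnt p) (bStep level coef p) hlen' hmem'
    simp only [List.foldl_cons]
    rw [this, hstep]
    have : aStep times level cnt p = cnt + aStep times level 0 p := by
      unfold aStep; split <;> ring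
    rw [this]; ring

theorem solve_eq (diffs times : List Int) (limit level : Int)
    (hpre : diffs.length ≤ times.length) :
    solve diffs times limit level = solve_alt diffs times limit level := by
  simp only [solve, solve_alt]
  -- A's index loop is a fold of aStep over enumerate diffs 0
  have hA : (PySem.List.pyRange 0 (diffs.length : Int) 1).foldl (fun cnt i =>
      if PySem.List.pyGetD diffs i 0 ≤ level then
        cnt + PySem.List.pyGetD times i 0
      else
        cnt + (PySem.List.pyGetD times i 0 * (PySem.List.pyGetD diffs i 0 - level) +
          PySem.List.pyGetD times (i - 1) 0 * (PySem.List.pyGetD diffs i 0 - level) +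
          PySem.List.pyGetD times i 0)) 0
      = (PySem.List.enumerate diffs 0).foldl (aStep times level) 0 := by
    rw [PySem.List.enumerate_eq_map_pyRange (d := 0), List.foldl_map]
    rfl
  have hmem : ∀ p ∈ PySem.List.enumerate diffs (0 : Int),
      0 ≤ p.1 ∧ p.1 < ((List.replicate times.length (0 : Int)).length : Int) ∧
      -(((List.replicate times.length (0 : Int)).length : Int)) ≤ p.1 - 1 := by
    intro p hp
    rw [PySem.List.mem_enumerate_iff] at hp
    obtain ⟨k, hk, rfl⟩ := hp
    simp only [List.length_replicate]
    have hd : (0:Int) < times.length := by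
      have : 0 < diffs.length := by omega
      omega
    constructor
    · omega
    constructor
    · have : (k : Int) < diffs.length := by exact_mod_cast hk
      omega
    · omega
  have hinv := fold_inv times level (PySem.List.enumerate diffs 0) 0
      (List.replicate times.length 0) (by simp) hmem
  rw [hA, hinv, dotP_replicate_zero]
  have hfinal : ∀ a b : Int, a = b →
      ((if limit < a then false else true) = decide (b ≤ limit)) := by
    intro a b hab; subst hab; by_cases h : limit < a <;> simp [h] <;> omega
  exact hfinal _ _ (by unfold dotP bStep; ring)

-- ===== VERDICT (by name: the statement is the Claim_ definition above) =====
theorem solve_spec : Claim_equal_solve := by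
  intro diffs times limit level _ hpre
  unfold Spec_solve
  exact solve_eq diffs times limit level hpre
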